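-- pv_equiv track=rewrite | github.com/saisriharine/CLINICAL_DECISION_SUPPORT_SYSTEM | agents/risk_agent.py | _extract_condition
-- ===== SOURCE A (Python) =====
-- def _extract_condition(text: str) -> str | None:
--     """Returns ALL matching conditions so evaluate_risk can try multiple scoring systems."""
--     text_lower = text.lower()
--     condition_keywords = {
--         "chest pain": "chest pain",
--         "chest tightness": "chest pain",
--         "cardiac": "chest pain",
--         "angina": "chest pain",
--         "heart failure": "heart failure",
--         "decompensated": "heart failure",
--         "ankle swelling": "heart failure",
--         "atrial fibrillation": "atrial fibrillation",
--         "af ": "atrial fibrillation",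
--         "a-fib": "atrial fibrillation",
--         "stroke": "atrial fibrillation",
--         "dvt": "DVT",
--         "deep vein": "DVT",
--         "leg swelling": "leg swelling",
--         "pneumonia": "pneumonia",
--         "lung infection": "pneumonia",
--         "productive cough": "pneumonia",
--         "cough": "cough",
--         "sepsis": "sepsis",
--         "infection": "suspected infection",
--         "dengue": "dengue fever",
--         "fever": "fever",
--         "breathlessness": "breathlessness",
--         "dyspnea": "breathlessness",
--         "bleeding": "hemorrhagic risk",
--         "platelet": "thrombocytopenia risk",
--     }
--     found = []
--     seen = set()
--     for keyword, condition in condition_keywords.items():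
--         if keyword in text_lower and condition not in seen:
--             found.append(condition)
--             seen.add(condition)
--     return " ".join(found) if found else None
-- ===== SOURCE B (Python) =====
-- def _extract_condition(text: str) -> str | None:
--     """Returns ALL matching conditions so evaluate_risk can try multiple scoring systems."""
--     condition_groups = [
--         ("chest pain", ["chest pain", "chest tightness", "cardiac", "angina"]),
--         ("heart failure", ["heart failure", "decompensated", "ankle swelling"]),
--         ("atrial fibrillation", ["atrial fibrillation", "af ", "a-fib", "stroke"]),
--         ("DVT", ["dvt", "deep vein"]),
--         ("leg swelling", ["leg swelling"]),
--         ("pneumonia", ["pneumonia", "lung infection", "productive cough"]),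
--         ("cough", ["cough"]),
--         ("sepsis", ["sepsis"]),
--         ("suspected infection", ["infection"]),
--         ("dengue fever", ["dengue"]),
--         ("fever", ["fever"]),
--         ("breathlessness", ["breathlessness", "dyspnea"]),
--         ("hemorrhagic risk", ["bleeding"]),
--         ("thrombocytopenia risk", ["platelet"]),
--     ]
--     keywords = [kw for _, kws in condition_groups for kw in kws]
--     text_lower = text.lower()
--     # stage 1: scan the text position by position, collecting every keyword
--     # that starts somewhere in it (all keywords are non-empty)
--     matched = set()
--     for i in range(len(text_lower)):
--         for kw in keywords:
--             if text_lower.startswith(kw, i):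
--                 matched.add(kw)
--     # stage 2: read off the conditions whose keyword group was hit, in order
--     found = [cond for cond, kws in condition_groups if matched.intersection(kws)]
--     return " ".join(found) if found else None
-- ===== Notes on version B (the rewrite author's own statement) =====
-- stated objective: alternative
-- what changed: Replaces A's per-keyword substring-containment scan with seen-set dedup by a two-stage text-driven algorithm: stage 1 walks the text position by position collecting into a set every keyword that starts there (startswith at each offset), stage 2 reads off the conditions from an ordered condition->keywords grouping by intersecting each group with the matched set; no per-keyword substring search and no seen-set remain.
import Mathlib
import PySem

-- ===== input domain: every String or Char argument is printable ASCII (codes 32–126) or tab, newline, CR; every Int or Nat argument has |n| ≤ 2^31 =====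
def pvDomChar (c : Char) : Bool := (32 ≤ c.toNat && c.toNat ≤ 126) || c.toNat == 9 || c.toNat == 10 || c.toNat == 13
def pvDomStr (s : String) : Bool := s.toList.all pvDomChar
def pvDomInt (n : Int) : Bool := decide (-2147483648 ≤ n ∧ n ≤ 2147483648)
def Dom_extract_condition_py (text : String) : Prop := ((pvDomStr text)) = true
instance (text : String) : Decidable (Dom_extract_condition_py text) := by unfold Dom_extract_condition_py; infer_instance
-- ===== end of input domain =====

-- B replaces A's per-keyword substring scan with seen-set dedup by a two-stage text-position scan:
-- collect every keyword starting at some text offset into a set, then read conditions off a grouped table.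

-- ===== PORT A =====
-- the literal dict of A, in insertion order
def pvKeywordDict : List (String × String) :=
  [("chest pain", "chest pain"), ("chest tightness", "chest pain"), ("cardiac", "chest pain"),
   ("angina", "chest pain"), ("heart failure", "heart failure"), ("decompensated", "heart failure"),
   ("ankle swelling", "heart failure"), ("atrial fibrillation", "atrial fibrillation"),
   ("af ", "atrial fibrillation"), ("a-fib", "atrial fibrillation"), ("stroke", "atrial fibrillation"),
   ("dvt", "DVT"), ("deep vein", "DVT"), ("leg swelling", "leg swelling"),
   ("pneumonia", "pneumonia"), ("lung infection", "pneumonia"), ("productive cough", "pneumonia"),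
   ("cough", "cough"), ("sepsis", "sepsis"), ("infection", "suspected infection"),
   ("dengue", "dengue fever"), ("fever", "fever"), ("breathlessness", "breathlessness"),
   ("dyspnea", "breathlessness"), ("bleeding", "hemorrhagic risk"), ("platelet", "thrombocytopenia risk")]

-- A's loop body: append the condition if the keyword occurs and the condition is unseen
def pvStepA (tl : String) (st : List String × PySem.Set String) (kc : String × String) :
    List String × PySem.Set String :=
  if PySem.Str.isIn kc.1 tl && !(PySem.Set.contains st.2 kc.2) then
    (st.1 ++ [kc.2], PySem.Set.add st.2 kc.2)
  else st

def extract_condition_py (text : String) : Option String :=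
  let text_lower := PySem.Str.lower text
  let st := pvKeywordDict.foldl (pvStepA text_lower) ([], PySem.Set.empty)
  if st.1 ≠ [] then some (PySem.Str.join " " st.1) else none

-- ===== PORT B =====
-- the same data grouped: each condition once, with the list of its trigger keywords
def pvGroups : List (String × List String) :=
  [("chest pain", ["chest pain", "chest tightness", "cardiac", "angina"]),
   ("heart failure", ["heart failure", "decompensated", "ankle swelling"]),
   ("atrial fibrillation", ["atrial fibrillation", "af ", "a-fib", "stroke"]),
   ("DVT", ["dvt", "deep vein"]),
   ("leg swelling", ["leg swelling"]),
   ("pneumonia", ["pneumonia", "lung infection", "productive cough"]),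
   ("cough", ["cough"]),
   ("sepsis", ["sepsis"]),
   ("suspected infection", ["infection"]),
   ("dengue fever", ["dengue"]),
   ("fever", ["fever"]),
   ("breathlessness", ["breathlessness", "dyspnea"]),
   ("hemorrhagic risk", ["bleeding"]),
   ("thrombocytopenia risk", ["platelet"])]

-- keywords = [kw for _, kws in condition_groups for kw in kws]
def pvKeywords : List String := pvGroups.flatMap (fun g => g.2)

-- stage-1 inner loop at one text position i; text_lower.startswith(kw, i) is ported
-- exactly (for 0 ≤ i) as startswith on the list dropped at i
def pvScanPos (tl : List Char) (m : PySem.Set String) (i : Nat) : PySem.Set String :=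
  pvKeywords.foldl
    (fun m kw => if PySem.Chars.startswith (tl.drop i) kw.toList then PySem.Set.add m kw else m) m

def extract_condition_py_alt (text : String) : Option String :=
  let tl := (PySem.Str.lower text).toList
  let matched := (List.range tl.length).foldl (pvScanPos tl) PySem.Set.empty
  let found := (pvGroups.filter (fun g => PySem.Set.inter matched g.2 ≠ [])).map Prod.fst
  if found ≠ [] then some (PySem.Str.join " " found) else none

-- ===== PRECONDITION & SPEC =====
def Spec_extract_condition_py (text : String) (out : Option String) : Prop := out = extract_condition_py_alt text
instance (text : String) (out : Option String) : Decidable (Spec_extract_condition_py text out) := by unfold Spec_extract_condition_py; infer_instance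

-- ===== CLAIM (what is proved, stated in full; the proofs are below) =====
def Claim_equal_extract_condition_py : Prop := ∀ (text : String), Dom_extract_condition_py text → Spec_extract_condition_py text (extract_condition_py text)

-- ===== LEMMAS AND PROOFS =====


-- once a condition is in `seen`, the rest of its keyword group cannot change A's state
theorem pvStepA_frozen (tl : String) (c : String) (kws : List String)
    (st : List String × PySem.Set String) (h : c ∈ st.2) :
    kws.foldl (fun s k => pvStepA tl s (k, c)) st = st := by
  induction kws generalizing st with
  | nil => rfl
  | cons k ks ih =>
    have hstep : pvStepA tl st (k, c) = st := by
      simp [pvStepA, h]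
    simpa [List.foldl_cons, hstep] using ih st h

-- one whole group of A's loop, for an unseen condition: it appends c iff some keyword matches
theorem pvGroupA (tl : String) (c : String) (kws : List String)
    (found : List String) (seen : PySem.Set String) (h : c ∉ seen) :
    (kws.map (fun k => (k, c))).foldl (pvStepA tl) (found, seen)
      = if kws.any (fun k => PySem.Str.isIn k tl) then
          (found ++ [c], PySem.Set.add seen c) else (found, seen) := by
  induction kws with
  | nil => simp
  | cons k ks ih =>
    by_cases hk : PySem.Str.isIn k tl = true
    · have hk' : PySem.Chars.isIn k.toList tl.toList = true := by simpa using hk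
      have hstep : pvStepA tl (found, seen) (k, c)
          = (found ++ [c], PySem.Set.add seen c) := by
        simp [pvStepA, hk', h]
      have hfoldmap : ∀ st, (ks.map (fun k => (k, c))).foldl (pvStepA tl) st
          = ks.foldl (fun s k => pvStepA tl s (k, c)) st := by
        intro st; rw [List.foldl_map]
      have hc' : c ∈ PySem.Set.add seen c := by
        simp [PySem.Set.mem_add]
      simp only [List.map_cons, List.foldl_cons, hstep, hfoldmap,
        List.any_cons, hk, Bool.true_or, if_pos]
      exact pvStepA_frozen tl c ks (found ++ [c], PySem.Set.add seen c) hc'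
    · have hk' : ¬ PySem.Chars.isIn k.toList tl.toList = true := by simpa using hk
      have hstep : pvStepA tl (found, seen) (k, c) = (found, seen) := by
        simp [pvStepA, hk', h]
      simp only [List.map_cons, List.foldl_cons, hstep, ih, List.any_cons, hk,
        Bool.false_or]

-- A's loop over a grouped keyword list equals the grouped filter, given fresh, distinct conditions
theorem pvLoopA_groups (tl : String) (groups : List (String × List String))
    (found : List String) (seen : PySem.Set String)
    (hfresh : ∀ g ∈ groups, g.1 ∉ seen)
    (hnodup : (groups.map Prod.fst).Nodup) :
    ((groups.flatMap (fun g => g.2.map (fun k => (k, g.1)))).foldl (pvStepA tl)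
        (found, seen)).1
      = found ++ (groups.filter
          (fun g => g.2.any (fun k => PySem.Str.isIn k tl))).map Prod.fst := by
  induction groups generalizing found seen with
  | nil => simp
  | cons g gs ih =>
    simp only [List.map_cons, List.nodup_cons] at hnodup
    have hfg : g.1 ∉ seen := hfresh g (by simp)
    simp only [List.flatMap_cons, List.foldl_append,
      pvGroupA tl g.1 g.2 found seen hfg]
    by_cases hm : g.2.any (fun k => PySem.Str.isIn k tl) = true
    · have hm' : (g.2.any fun k => PySem.Chars.isIn k.toList tl.toList) = true := by
        simpa using hm
      rw [if_pos hm]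
      have hfresh' : ∀ h ∈ gs, h.1 ∉ PySem.Set.add seen g.1 := by
        intro h hh
        rw [PySem.Set.mem_add]
        rintro (hs | he)
        · exact hfresh h (by simp [hh]) hs
        · exact hnodup.1 (he ▸ List.mem_map_of_mem hh)
      rw [ih (found ++ [g.1]) _ hfresh' hnodup.2]
      simp [hm']
    · have hm' : ¬ (g.2.any fun k => PySem.Chars.isIn k.toList tl.toList) = true := by
        simpa using hm
      rw [if_neg hm]
      have hfresh' : ∀ h ∈ gs, h.1 ∉ seen := fun h hh => hfresh h (by simp [hh])
      rw [ih found seen hfresh' hnodup.2]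
      simp [hm']

-- the two literal tables carry the same data: A's dict is B's grouping flattened
theorem pvKeywordDict_eq_flatMap :
    pvKeywordDict = pvGroups.flatMap (fun g => g.2.map (fun k => (k, g.1))) := by
  rfl

theorem pvGroups_nodup : (pvGroups.map Prod.fst).Nodup := by decide

-- every group keyword is in the flat keyword list and is non-empty
theorem pvGroups_kw_facts : ∀ g ∈ pvGroups, ∀ k ∈ g.2, k ∈ pvKeywords ∧ k.toList ≠ [] := by
  decide

-- membership after B's stage-1 inner loop (one position)
theorem pvMem_scanPos (tl : List Char) (m : PySem.Set String) (i : Nat) (x : String) :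
    x ∈ pvScanPos tl m i
      ↔ x ∈ m ∨ (x ∈ pvKeywords ∧ PySem.Chars.startswith (tl.drop i) x.toList = true) := by
  unfold pvScanPos
  generalize pvKeywords = kws
  induction kws generalizing m with
  | nil => simp
  | cons k ks ih =>
    by_cases hp : PySem.Chars.startswith (tl.drop i) k.toList = true
    · simp only [List.foldl_cons, hp, if_pos, ih, PySem.Set.mem_add, List.mem_cons]
      constructor
      · rintro ((h | rfl) | ⟨hk, hs⟩)
        · exact Or.inl h
        · exact Or.inr ⟨Or.inl rfl, hp⟩
        · exact Or.inr ⟨Or.inr hk, hs⟩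
      · rintro (h | ⟨(rfl | hk), hs⟩)
        · exact Or.inl (Or.inl h)
        · exact Or.inl (Or.inr rfl)
        · exact Or.inr ⟨hk, hs⟩
    · rw [List.foldl_cons, if_neg hp, ih]
      simp only [List.mem_cons]
      constructor
      · rintro (h | ⟨hk, hs⟩)
        · exact Or.inl h
        · exact Or.inr ⟨Or.inr hk, hs⟩
      · rintro (h | ⟨(rfl | hk), hs⟩)
        · exact Or.inl h
        · exact absurd hs hp
        · exact Or.inr ⟨hk, hs⟩

-- membership after B's whole stage-1 scan over a list of positions
theorem pvMem_scan (tl : List Char) (is : List Nat) (m : PySem.Set String) (x : String) :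
    x ∈ is.foldl (pvScanPos tl) m
      ↔ x ∈ m ∨ (x ∈ pvKeywords ∧
          ∃ i ∈ is, PySem.Chars.startswith (tl.drop i) x.toList = true) := by
  induction is generalizing m with
  | nil => simp
  | cons i js ih =>
    simp only [List.foldl_cons, ih, pvMem_scanPos, List.mem_cons]
    constructor
    · rintro ((h | ⟨hk, hs⟩) | ⟨hk, j, hj, hs⟩)
      · exact Or.inl h
      · exact Or.inr ⟨hk, i, Or.inl rfl, hs⟩
      · exact Or.inr ⟨hk, j, Or.inr hj, hs⟩
    · rintro (h | ⟨hk, j, (rfl | hj), hs⟩)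
      · exact Or.inl (Or.inl h)
      · exact Or.inl (Or.inr ⟨hk, hs⟩)
      · exact Or.inr ⟨hk, j, hj, hs⟩

-- B's matched set holds exactly the non-empty keywords that occur in the text
theorem pvMem_matched (tl : List Char) (x : String) (hx : x.toList ≠ []) :
    x ∈ (List.range tl.length).foldl (pvScanPos tl) PySem.Set.empty
      ↔ x ∈ pvKeywords ∧ PySem.Chars.isIn x.toList tl = true := by
  rw [pvMem_scan]
  simp only [PySem.Set.empty, List.not_mem_nil, false_or, List.mem_range]
  constructor
  · rintro ⟨hk, i, _, hs⟩
    exact ⟨hk, (PySem.Chars.exists_prefix_drop_iff_isIn _ _).1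
      ⟨i, (PySem.Chars.startswith_iff _ _).1 hs⟩⟩
  · rintro ⟨hk, hin⟩
    obtain ⟨j, hj⟩ := (PySem.Chars.exists_prefix_drop_iff_isIn _ _).2 hin
    refine ⟨hk, j, ?_, (PySem.Chars.startswith_iff _ _).2 hj⟩
    by_contra hlen
    push Not at hlen
    rw [List.drop_eq_nil_of_le hlen] at hj
    exact hx (List.prefix_nil.mp hj)

-- a Python set intersection is truthy iff the two sides share an element
theorem pvInter_ne_nil_iff (s : PySem.Set String) (t : List String) :
    PySem.Set.inter s t ≠ [] ↔ ∃ x ∈ s, x ∈ t := by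
  simp [PySem.Set.inter, List.filter_eq_nil_iff]

-- ===== VERDICT (by name: the statement is the Claim_ definition above) =====
theorem extract_condition_py_spec : Claim_equal_extract_condition_py := by
  intro text _
  show extract_condition_py text = extract_condition_py_alt text
  have h2 : (List.foldl (pvStepA (PySem.Str.lower text)) ([], PySem.Set.empty) pvKeywordDict).1
      = List.map Prod.fst (List.filter
          (fun g => g.2.any fun k => PySem.Str.isIn k (PySem.Str.lower text)) pvGroups) := by
    rw [pvKeywordDict_eq_flatMap]
    simpa using pvLoopA_groups (PySem.Str.lower text) pvGroups [] PySem.Set.empty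
      (by intro g _ hg; simp [PySem.Set.empty] at hg) pvGroups_nodup
  have hfil : List.filter
        (fun g => decide (PySem.Set.inter
            ((List.range (PySem.Str.lower text).toList.length).foldl
              (pvScanPos (PySem.Str.lower text).toList) PySem.Set.empty) g.2 ≠ [])) pvGroups
      = List.filter
          (fun g => g.2.any fun k => PySem.Str.isIn k (PySem.Str.lower text)) pvGroups := by
    apply List.filter_congr
    intro g hg
    have hiff : (PySem.Set.inter
          ((List.range (PySem.Str.lower text).toList.length).foldl
            (pvScanPos (PySem.Str.lower text).toList) PySem.Set.empty) g.2 ≠ [])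
        ↔ (g.2.any fun k => PySem.Str.isIn k (PySem.Str.lower text)) = true := by
      rw [pvInter_ne_nil_iff]
      simp only [List.any_eq_true]
      constructor
      · rintro ⟨x, hxm, hxg⟩
        obtain ⟨hkw, hne⟩ := pvGroups_kw_facts g hg x hxg
        have := (pvMem_matched _ x hne).1 hxm
        exact ⟨x, hxg, by simpa using this.2⟩
      · rintro ⟨k, hkg, hkin⟩
        obtain ⟨hkw, hne⟩ := pvGroups_kw_facts g hg k hkg
        refine ⟨k, (pvMem_matched _ k hne).2 ⟨hkw, by simpa using hkin⟩, hkg⟩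
    by_cases hb : (g.2.any fun k => PySem.Str.isIn k (PySem.Str.lower text)) = true
    · have hin := hiff.mpr hb
      simp at hin hb ⊢
      simp [hin, hb]
    · have h0 : PySem.Set.inter
          ((List.range (PySem.Str.lower text).toList.length).foldl
            (pvScanPos (PySem.Str.lower text).toList) PySem.Set.empty) g.2 = [] := by
        by_contra hc; exact hb (hiff.mp hc)
      simp only [Bool.not_eq_true] at hb
      simp at h0 hb ⊢
      simp [h0]
      exact hb
  show (if (List.foldl (pvStepA (PySem.Str.lower text)) ([], PySem.Set.empty) pvKeywordDict).1 ≠ [] then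
          some (PySem.Str.join " "
            (List.foldl (pvStepA (PySem.Str.lower text)) ([], PySem.Set.empty) pvKeywordDict).1)
        else none) = _
  rw [h2]
  show _ = (if (List.map Prod.fst (List.filter _ pvGroups)) ≠ [] then
          some (PySem.Str.join " " (List.map Prod.fst (List.filter _ pvGroups))) else none)
  rw [hfil]
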